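-- pv_equiv track=rewrite | github.com/YuanzhongLi/Practice_Competitive_Programming_Python | LeetCode/problems/1781.py | beauty
-- ===== SOURCE A (Python) =====
-- INF = 1000000007
--
-- def beauty(A):
--     mi = INF
--     ma = -INF
--     non_zero = 0
--     for a in A:
--         if a != 0:
--             non_zero += 1
--             mi = min(mi, a)
--             ma = max(ma, a)
--
--     if non_zero >= 2:
--         return ma - mi
--     return 0
-- ===== SOURCE B (Python) =====
-- def beauty(A):
--     nz = sorted(a for a in A if a != 0)
--     if len(nz) < 2:
--         return 0
--     return nz[-1] - nz[0]
-- ===== Notes on version B (the rewrite author's own statement) =====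
-- stated objective: alternative
-- what changed: Replaces A's fused single pass maintaining running min/max/count against an INF sentinel with a sort-based algorithm: sort the non-zero elements once and take the difference of the two endpoints of the sorted list (last minus first).
-- intended difference: On lists with at least two non-zero elements that are all > 1000000007 (or all < -1000000007), A's INF sentinel survives the running min (resp. max) so A returns a value offset by the sentinel (e.g. 999999993 on [2000000000, 1500000000]), while B returns the true max-min (500000000), which is the intended beauty. — e.g. on beauty([2000000000, 1500000000]): A returns 999999993, B returns 500000000
import Mathlib
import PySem

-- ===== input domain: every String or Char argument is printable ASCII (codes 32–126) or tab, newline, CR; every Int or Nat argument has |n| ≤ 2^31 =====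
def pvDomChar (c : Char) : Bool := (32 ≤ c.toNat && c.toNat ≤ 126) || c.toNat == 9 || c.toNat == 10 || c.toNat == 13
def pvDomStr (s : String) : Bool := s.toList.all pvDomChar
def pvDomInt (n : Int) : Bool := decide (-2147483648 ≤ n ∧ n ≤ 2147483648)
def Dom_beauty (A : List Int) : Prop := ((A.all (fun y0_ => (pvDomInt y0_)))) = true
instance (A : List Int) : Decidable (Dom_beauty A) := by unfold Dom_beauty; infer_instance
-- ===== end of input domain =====

-- B replaces A's fused running-min/max/count pass (INF sentinel) by sort-then-endpoints: a different algorithm.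

-- ===== PORT A =====
-- the loop state is (mi, ma, non_zero), exactly A's three variables
def beautyLoop (A : List Int) : Int × Int × Int :=
  A.foldl (fun st a =>
      if a ≠ 0 then (min st.1 a, max st.2.1 a, st.2.2 + 1) else st)
    (1000000007, -1000000007, 0)

def beauty (A : List Int) : Int :=
  let s := beautyLoop A
  if s.2.2 ≥ 2 then s.2.1 - s.1 else 0

-- ===== PORT B =====
def beauty_alt (A : List Int) : Int :=
  let nz := PySem.List.sorted (A.filter (fun a => a ≠ 0)) (fun x => x) false
  if nz.length < 2 then 0
  else (PySem.List.pyGet? nz (-1)).getD 0 - (PySem.List.pyGet? nz 0).getD 0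

-- ===== PRECONDITION & SPEC =====
-- On lists with ≥ 2 non-zero elements that are all > 1000000007 (or all < -1000000007), A's INF sentinel
-- survives the running min (resp. max), so A returns a sentinel-offset value, while B returns the true
-- max - min of the non-zero elements, which is the intended beauty.
def D_beauty (A : List Int) : Prop :=
  2 ≤ (A.filter (fun a => a ≠ 0)).length ∧
    ((∀ a ∈ A.filter (fun a => a ≠ 0), 1000000007 < a) ∨
     (∀ a ∈ A.filter (fun a => a ≠ 0), a < -1000000007))
instance (A : List Int) : Decidable (D_beauty A) := by unfold D_beauty; infer_instance

def Spec_beauty (A : List Int) (out : Int) : Prop := ¬ D_beauty A → out = beauty_alt A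
instance (A : List Int) (out : Int) : Decidable (Spec_beauty A out) := by unfold Spec_beauty; infer_instance

def pvDiffWitness_beauty : List Int := [2000000000, 1500000000]
def pvDiffWitnessOut_beauty : Int × Int := (999999993, 500000000)

-- ===== CLAIM (what is proved, stated in full; the proofs are below) =====
def Claim_unchanged_beauty : Prop := ∀ (A : List Int), Dom_beauty A → Spec_beauty A (beauty A)
def Claim_changed_beauty : Prop := Dom_beauty (pvDiffWitness_beauty) ∧ D_beauty (pvDiffWitness_beauty) ∧ beauty (pvDiffWitness_beauty) = pvDiffWitnessOut_beauty.1 ∧ beauty_alt (pvDiffWitness_beauty) = pvDiffWitnessOut_beauty.2 ∧ pvDiffWitnessOut_beauty.1 ≠ pvDiffWitnessOut_beauty.2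
def Claim_exact_beauty : Prop := ∀ (A : List Int), Dom_beauty A → D_beauty A → beauty A ≠ beauty_alt A

-- ===== LEMMAS AND PROOFS =====

-- A's loop over A is the (min, max, count) fold over the filtered non-zero list.
lemma beautyLoop_filter (A : List Int) (mi ma n : Int) :
    A.foldl (fun st a => if a ≠ 0 then (min st.1 a, max st.2.1 a, st.2.2 + 1) else st) (mi, ma, n)
      = ((A.filter (fun a => a ≠ 0)).foldl min mi,
         (A.filter (fun a => a ≠ 0)).foldl max ma,
         n + ((A.filter (fun a => a ≠ 0)).length : Int)) := by
  induction A generalizing mi ma n with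
  | nil => simp
  | cons x t ih =>
    by_cases hx : x = 0
    · simpa [hx] using ih mi ma n
    · have h := ih (min mi x) (max ma x) (n + 1)
      rw [List.foldl_cons, if_pos hx, h,
        List.filter_cons_of_pos (by simpa using hx)]
      simp only [List.foldl_cons, List.length_cons]
      refine Prod.ext rfl (Prod.ext rfl ?_)
      push_cast
      ring

lemma foldl_min_pull (t : List Int) (a b : Int) :
    t.foldl min (min a b) = min a (t.foldl min b) := by
  induction t generalizing b with
  | nil => rfl
  | cons c t ih =>
    simp only [List.foldl_cons, min_assoc, ih]

lemma foldl_max_pull (t : List Int) (a b : Int) :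
    t.foldl max (max a b) = max a (t.foldl max b) := by
  induction t generalizing b with
  | nil => rfl
  | cons c t ih =>
    simp only [List.foldl_cons, max_assoc, ih]

-- min(INF, x, …) collapses to the true min when some element is ≤ INF
lemma foldl_min_sentinel (x : Int) (t : List Int) (s : Int)
    (h : ∃ a ∈ x :: t, a ≤ s) :
    (x :: t).foldl min s = t.foldl min x := by
  have hpull : (x :: t).foldl min s = min s (t.foldl min x) := by
    simpa using foldl_min_pull t s x
  rcases h with ⟨a, ha, hle⟩
  have hmem := PySem.List.foldl_min_le t x
  have : t.foldl min x ≤ s := by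
    rcases List.mem_cons.mp ha with rfl | ha'
    · exact le_trans hmem.1 hle
    · exact le_trans (hmem.2 a ha') hle
  rw [hpull, min_eq_right this]

lemma foldl_max_sentinel (x : Int) (t : List Int) (s : Int)
    (h : ∃ a ∈ x :: t, s ≤ a) :
    (x :: t).foldl max s = t.foldl max x := by
  have hpull : (x :: t).foldl max s = max s (t.foldl max x) := by
    simpa using foldl_max_pull t s x
  rcases h with ⟨a, ha, hle⟩
  have hmem := PySem.List.le_foldl_max t x
  have : s ≤ t.foldl max x := by
    rcases List.mem_cons.mp ha with rfl | ha'
    · exact le_trans hle hmem.1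
    · exact le_trans hle (hmem.2 a ha')
  rw [hpull, max_eq_right this]

lemma beautyLoop_eq (A : List Int) :
    beautyLoop A = ((A.filter (fun a => a ≠ 0)).foldl min 1000000007,
      (A.filter (fun a => a ≠ 0)).foldl max (-1000000007),
      0 + ((A.filter (fun a => a ≠ 0)).length : Int)) := by
  unfold beautyLoop
  exact beautyLoop_filter A _ _ _

-- in a ≤-pairwise (i.e. sorted) list the last element bounds every member
lemma pairwise_le_getLast? (l : List Int) (h : l.Pairwise (· ≤ ·)) :
    ∀ y ∈ l, ∀ z, l.getLast? = some z → y ≤ z := by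
  induction l with
  | nil => intro y hy; simp at hy
  | cons x t ih =>
    intro y hy z hz
    cases t with
    | nil =>
      simp at hy hz
      omega
    | cons b u =>
      have hlast : (x :: b :: u).getLast? = (b :: u).getLast? := by
        simp [List.getLast?]
      rw [hlast] at hz
      have hp := List.pairwise_cons.mp h
      rcases List.mem_cons.mp hy with rfl | hy'
      · have hb : y ≤ b := hp.1 b List.mem_cons_self
        have := ih hp.2 b List.mem_cons_self z hz
        omega
      · exact ih hp.2 y hy' z hz

-- artifacts of B: head of sorted non-zeros = running min, last = running max
lemma sorted_head_last (x : Int) (t : List Int) :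
    ∃ u, PySem.List.sorted (x :: t) (fun y => y) false = (t.foldl min x) :: u ∧
      ((t.foldl min x) :: u).getLast? = some (t.foldl max x) := by
  set s := PySem.List.sorted (x :: t) (fun y => y) false with hs
  have hperm : s.Perm (x :: t) := PySem.List.sorted_perm _ _ _
  have hpw : s.Pairwise (fun a b => a ≤ b) :=
    PySem.List.sorted_pairwise (x :: t) (fun y => y) 
  cases hm : s with
  | nil =>
    exfalso
    have := hperm.length_eq
    rw [hm] at this; simp at this
  | cons m u =>
    have hmin_mem : t.foldl min x ∈ x :: t := by
      rcases PySem.List.foldl_min_mem t x with h | h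
      · rw [h]; exact List.mem_cons_self
      · exact List.mem_cons_of_mem x h
    have hmax_mem : t.foldl max x ∈ x :: t := by
      rcases PySem.List.foldl_max_mem t x with h | h
      · rw [h]; exact List.mem_cons_self
      · exact List.mem_cons_of_mem x h
    have hmin_le := PySem.List.foldl_min_le t x
    have hle_max := PySem.List.le_foldl_max t x
    -- head m equals the min
    have hhead : ∀ y ∈ (x :: t), m ≤ y :=
      PySem.List.key_head_sorted_le (x :: t) (fun y => y) hm
    have hm_mem : m ∈ x :: t := hperm.mem_iff.mp (by rw [hm]; exact List.mem_cons_self)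
    have hm_ge : t.foldl min x ≤ m := by
      rcases List.mem_cons.mp hm_mem with rfl | h'
      · exact hmin_le.1
      · exact hmin_le.2 m h'
    have hm_eq : m = t.foldl min x := le_antisymm (hhead _ hmin_mem) hm_ge
    -- last equals the max
    obtain ⟨z, hz⟩ : ∃ z, (m :: u).getLast? = some z := by
      cases hlq : (m :: u).getLast? with
      | none => exfalso; simp [List.getLast?_eq_none_iff] at hlq
      | some z => exact ⟨z, rfl⟩
    have hz_mem : z ∈ x :: t := by
      have : z ∈ m :: u := List.mem_of_getLast? hz
      exact hperm.mem_iff.mp (by rw [hm]; exact this)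
    have hz_le : z ≤ t.foldl max x := by
      rcases List.mem_cons.mp hz_mem with rfl | h'
      · exact hle_max.1
      · exact hle_max.2 z h'
    have hz_ge : t.foldl max x ≤ z := by
      have hmax_in_s : t.foldl max x ∈ m :: u := by
        rw [← hm]; exact hperm.mem_iff.mpr hmax_mem
      have hpw' : (m :: u).Pairwise (· ≤ ·) := by rw [← hm]; exact hpw
      exact pairwise_le_getLast? (m :: u) hpw' _ hmax_in_s z hz
    refine ⟨u, by rw [hm_eq], ?_⟩
    rw [← hm_eq, hz, le_antisymm hz_le hz_ge]

lemma beauty_alt_cons (A : List Int) (x : Int) (t : List Int)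
    (hxt : A.filter (fun a => a ≠ 0) = x :: t) (hlen : 2 ≤ (x :: t).length) :
    beauty_alt A = t.foldl max x - t.foldl min x := by
  unfold beauty_alt
  obtain ⟨u, hsort, hlast⟩ := sorted_head_last x t
  rw [hxt, hsort]
  have hlensort : ((t.foldl min x) :: u).length = (x :: t).length := by
    rw [← hsort, ← hxt]
    exact (PySem.List.sorted_perm _ _ _).length_eq.trans (by rw [hxt])
  rw [if_neg (by omega), PySem.List.pyGet?_neg_one, hlast,
    PySem.List.pyGet?_zero_cons]
  rfl

lemma nz_cons (A : List Int) (hlen : 2 ≤ (A.filter (fun a => a ≠ 0)).length) :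
    ∃ x t, A.filter (fun a => a ≠ 0) = x :: t := by
  cases h : A.filter (fun a => a ≠ 0) with
  | nil => rw [h] at hlen; simp at hlen
  | cons x t => exact ⟨x, t, rfl⟩

lemma beauty_eq (A : List Int) (h : ¬ D_beauty A) : beauty A = beauty_alt A := by
  by_cases hlen : 2 ≤ (A.filter (fun a => a ≠ 0)).length
  · obtain ⟨x, t, hxt⟩ := nz_cons A hlen
    rw [hxt] at hlen
    have hmin : ∃ a ∈ x :: t, a ≤ 1000000007 := by
      by_contra hc
      push Not at hc
      exact h ⟨by rw [hxt]; exact hlen, Or.inl (by rw [hxt]; intro a ha; exact hc a ha)⟩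
    have hmax : ∃ a ∈ x :: t, -1000000007 ≤ a := by
      by_contra hc
      push Not at hc
      exact h ⟨by rw [hxt]; exact hlen, Or.inr (by rw [hxt]; intro a ha; exact hc a ha)⟩
    rw [beauty_alt_cons A x t hxt hlen]
    unfold beauty
    rw [beautyLoop_eq A, hxt]
    have hcond : (0 + (((x :: t).length : Nat) : Int)) ≥ 2 := by omega
    simp only [hcond, if_pos]
    rw [foldl_min_sentinel x t _ hmin, foldl_max_sentinel x t _ hmax]
  · unfold beauty beauty_alt
    rw [beautyLoop_eq A]
    have hslen : (PySem.List.sorted (A.filter (fun a => a ≠ 0)) (fun x => x) false).length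
        = (A.filter (fun a => a ≠ 0)).length :=
      (PySem.List.sorted_perm _ _ _).length_eq
    have hA : ¬ (0 + (((A.filter (fun a => a ≠ 0)).length : Nat) : Int)) ≥ 2 := by omega
    have hB : (PySem.List.sorted (A.filter (fun a => a ≠ 0)) (fun x => x) false).length < 2 := by
      omega
    rw [if_neg hA, if_pos hB]

lemma beauty_ne (A : List Int) (hD : D_beauty A) : beauty A ≠ beauty_alt A := by
  obtain ⟨hlen, hor⟩ := hD
  obtain ⟨x, t, hxt⟩ := nz_cons A hlen
  rw [hxt] at hlen
  have hBeq := beauty_alt_cons A x t hxt hlen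
  have hmi : (x :: t).foldl min 1000000007 = min 1000000007 (t.foldl min x) := by
    simpa using foldl_min_pull t 1000000007 x
  have hma : (x :: t).foldl max (-1000000007) = max (-1000000007) (t.foldl max x) := by
    simpa using foldl_max_pull t (-1000000007) x
  have hminmem : t.foldl min x ∈ x :: t := by
    rcases PySem.List.foldl_min_mem t x with h | h
    · rw [h]; exact List.mem_cons_self
    · exact List.mem_cons_of_mem x h
  have hmaxmem : t.foldl max x ∈ x :: t := by
    rcases PySem.List.foldl_max_mem t x with h | h
    · rw [h]; exact List.mem_cons_self
    · exact List.mem_cons_of_mem x h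
  have hAval : beauty A = (x :: t).foldl max (-1000000007) - (x :: t).foldl min 1000000007 := by
    unfold beauty
    rw [beautyLoop_eq A, hxt]
    have hcond : (0 + (((x :: t).length : Nat) : Int)) ≥ 2 := by omega
    simp only [hcond, if_pos]
  rw [hAval, hBeq, hmi, hma]
  rcases hor with hall | hall
  · rw [hxt] at hall
    have h1 : 1000000007 < t.foldl min x := hall _ hminmem
    have h2 : 1000000007 < t.foldl max x := hall _ hmaxmem
    rw [min_eq_left (le_of_lt h1), max_eq_right (by omega : (-1000000007 : Int) ≤ t.foldl max x)]
    omega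
  · rw [hxt] at hall
    have h1 : t.foldl min x < -1000000007 := hall _ hminmem
    have h2 : t.foldl max x < -1000000007 := hall _ hmaxmem
    rw [min_eq_right (by omega : t.foldl min x ≤ 1000000007), max_eq_left (le_of_lt h2)]
    omega

-- ===== VERDICT =====
theorem beauty_spec : Claim_unchanged_beauty := by
  intro A _ hD
  exact beauty_eq A hD

theorem beauty_changed : Claim_changed_beauty := by unfold Claim_changed_beauty; decide

theorem beauty_tight : Claim_exact_beauty := by
  intro A _ hD
  exact beauty_ne A hD
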